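-- pv_equiv track=rewrite | github.com/AlexeyPolskiy/py_homework | Homework3/Task5.py | feb
-- ===== SOURCE A (Python) =====
-- def feb(k):
--     feb_lst = [1, 0, 1]
--     f_1 = 0
--     f_2 = 1
--     for i in range(2, k + 1):
--         feb_pos = f_1 + f_2
--         f_1, f_2 = f_2, feb_pos
--         feb_lst.append(feb_pos)
--     feb_neg_lst = []
--     f_1 = 0
--     f_2 = 1
--     for i in range(2, k + 1):
--         feb_neg = f_1 - f_2
--         f_1, f_2 = f_2, feb_neg
--         feb_neg_lst.append(feb_neg)
--     feb_neg_lst.reverse()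
--     feb_neg_lst.extend(feb_lst)
--     return feb_neg_lst
-- ===== SOURCE B (Python) =====
-- def feb(k):
--     # One Fibonacci loop; the negative side is derived from the positive
--     # tail by attaching alternating signs instead of a second recurrence loop.
--     lst = [1, 0, 1]
--     f1, f2 = 0, 1
--     for _ in range(2, k + 1):
--         f1, f2 = f2, f1 + f2
--         lst.append(f2)
--     neg = [v if i % 2 else -v for i, v in enumerate(lst[3:], start=2)]
--     neg.reverse()
--     return neg + lst
-- ===== Notes on version B (the rewrite author's own statement) =====
-- stated objective: simpler
-- what changed: B keeps only the positive Fibonacci loop and derives the negative side from the positive tail via the negafibonacci identity (an alternating-sign map over the appended values), instead of A's second subtraction-recurrence loop.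
import Mathlib
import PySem

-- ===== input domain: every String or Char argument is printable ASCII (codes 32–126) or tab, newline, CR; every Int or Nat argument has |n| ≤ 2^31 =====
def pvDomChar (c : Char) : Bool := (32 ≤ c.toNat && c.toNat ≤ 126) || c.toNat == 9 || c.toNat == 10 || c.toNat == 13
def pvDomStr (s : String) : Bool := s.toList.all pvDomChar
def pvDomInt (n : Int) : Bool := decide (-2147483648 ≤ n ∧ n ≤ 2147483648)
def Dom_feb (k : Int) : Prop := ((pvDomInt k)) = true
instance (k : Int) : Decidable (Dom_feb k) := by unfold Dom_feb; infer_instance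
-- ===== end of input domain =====

-- B replaces A's second (subtraction-recurrence) loop by deriving the negative
-- side from the positive tail with alternating signs (negafibonacci identity).

-- ===== PORT A =====
-- the shared positive-Fibonacci loop body (A's first loop; B's only loop)
def pvStepPos (st : Int × Int × List Int) (_ : Int) : Int × Int × List Int :=
  (st.2.1, st.1 + st.2.1, st.2.2 ++ [st.1 + st.2.1])

-- A's second loop body (negafibonacci recurrence)
def pvStepNeg (st : Int × Int × List Int) (_ : Int) : Int × Int × List Int :=
  (st.2.1, st.1 - st.2.1, st.2.2 ++ [st.1 - st.2.1])

def feb (k : Int) : List Int :=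
  let p := (PySem.List.pyRange 2 (k + 1) 1).foldl pvStepPos (0, 1, [1, 0, 1])
  let n := (PySem.List.pyRange 2 (k + 1) 1).foldl pvStepNeg (0, 1, [])
  n.2.2.reverse ++ p.2.2

-- ===== PORT B =====
def feb_alt (k : Int) : List Int :=
  let p := (PySem.List.pyRange 2 (k + 1) 1).foldl pvStepPos (0, 1, [1, 0, 1])
  let lst := p.2.2
  let neg := (PySem.List.enumerate (PySem.List.slice lst (some 3) none) 2).map
    (fun iv => if PySem.Int.mod iv.1 2 ≠ 0 then iv.2 else -iv.2)
  neg.reverse ++ lst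

-- ===== PRECONDITION & SPEC =====
def Spec_feb (k : Int) (out : List Int) : Prop := out = feb_alt k
instance (k : Int) (out : List Int) : Decidable (Spec_feb k out) := by unfold Spec_feb; infer_instance

-- ===== CLAIM (what is proved, stated in full; the proofs are below) =====
def Claim_equal_feb : Prop := ∀ (k : Int), Dom_feb k → Spec_feb k (feb k)

-- ===== LEMMAS AND PROOFS =====

-- the list of values appended by the positive loop
def posOut : List Int → Int → Int → List Int
  | [], _, _ => []
  | _ :: t, a, b => (a + b) :: posOut t b (a + b)

-- the list of values appended by A's negative loop
def negOut : List Int → Int → Int → List Int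
  | [], _, _ => []
  | _ :: t, a, b => (a - b) :: negOut t b (a - b)

theorem foldPos_acc (L : List Int) : ∀ (a b : Int) (acc : List Int),
    (L.foldl pvStepPos (a, b, acc)).2.2 = acc ++ posOut L a b := by
  induction L with
  | nil => intro a b acc; simp [posOut]
  | cons x t ih =>
      intro a b acc
      simp [List.foldl, pvStepPos, posOut, ih, List.append_assoc]

theorem foldNeg_acc (L : List Int) : ∀ (a b : Int) (acc : List Int),
    (L.foldl pvStepNeg (a, b, acc)).2.2 = acc ++ negOut L a b := by
  induction L with
  | nil => intro a b acc; simp [negOut]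
  | cons x t ih =>
      intro a b acc
      simp [List.foldl, pvStepNeg, negOut, ih, List.append_assoc]

-- key identity: the alternating-sign map over the positive tail IS A's negative list
theorem negmap (L : List Int) : ∀ (a b i s : Int),
    (s = 1 ∧ PySem.Int.mod i 2 ≠ 0) ∨ (s = -1 ∧ PySem.Int.mod i 2 = 0) →
    (PySem.List.enumerate (posOut L a b) i).map
      (fun iv => if PySem.Int.mod iv.1 2 ≠ 0 then iv.2 else -iv.2)
    = negOut L (s * a) (-s * b) := by
  induction L with
  | nil => intro a b i s _; simp [posOut, negOut, PySem.List.enumerate_nil]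
  | cons x t ih =>
      intro a b i s hs
      have hm : PySem.Int.mod i 2 = i % 2 := PySem.Int.mod_eq_emod_of_pos (by omega)
      have hm1 : PySem.Int.mod (i + 1) 2 = (i + 1) % 2 :=
        PySem.Int.mod_eq_emod_of_pos (by omega)
      have htail := ih b (a + b) (i + 1) (-s) (by
        rcases hs with ⟨h1, h2⟩ | ⟨h1, h2⟩
        · right; constructor; · omega
          rw [hm] at h2; rw [hm1]; omega
        · left; constructor; · omega
          rw [hm] at h2; rw [hm1]; omega)
      simp only [posOut, negOut, PySem.List.enumerate_cons, List.map_cons]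
      congr 1
      · rcases hs with ⟨h1, h2⟩ | ⟨h1, h2⟩
        · rw [if_pos h2, h1]; ring
        · rw [if_neg (fun h => h h2), h1]; ring
      · rw [htail]; congr 1; ring

theorem feb_eq_alt (k : Int) : feb k = feb_alt k := by
  unfold feb feb_alt
  simp only [foldPos_acc, foldNeg_acc, List.nil_append]
  have hslice : PySem.List.slice ([1, 0, 1] ++ posOut (PySem.List.pyRange 2 (k + 1) 1) 0 1)
      (some 3) none = posOut (PySem.List.pyRange 2 (k + 1) 1) 0 1 := by
    rw [PySem.List.slice_from _ (show (0:Int) ≤ 3 by norm_num)]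
    simp
  rw [hslice]
  have hmap := negmap (PySem.List.pyRange 2 (k + 1) 1) 0 1 2 (-1)
    (Or.inr ⟨rfl, by simp [PySem.Int.mod_eq_emod_of_pos]⟩)
  rw [hmap]
  norm_num

-- ===== VERDICT (by name: the statement is the Claim_ definition above) =====
theorem feb_spec : Claim_equal_feb := by
  intro k _
  unfold Spec_feb
  exact feb_eq_alt k
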